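-- pv_equiv track=rewrite | github.com/aeslami1379/Python-Encryption-Toolkit | encryption.py | generatePad
-- ===== SOURCE A (Python) =====
-- def generatePad(seed, k, length):
--     prl = []
--     while len(prl) < length:
--         xor = seed[0] ^ seed[-k]
--         seed.pop(0)
--         seed.append(xor)
--         prl.append(seed[-1])
--     return prl
-- ===== SOURCE B (Python) =====
-- def generatePad(seed, k, length):
--     if length <= 0:
--         return []
--     n = len(seed)
--     j = (-k) % n
--     s = list(seed)
--     for i in range(length):
--         s.append(s[i] ^ s[i + j])
--     seed[:] = s[length:length + n]
--     return s[n:]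
-- ===== Notes on version B (the rewrite author's own statement) =====
-- stated objective: faster
-- what changed: Replaces the pop(0)/append sliding register with one flat self-referential sequence s (s[n+i] = s[i] ^ s[i + (-k) % n]) built by plain appends, returning its tail; the O(n)-per-step pop(0) shifting disappears.
import Mathlib
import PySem

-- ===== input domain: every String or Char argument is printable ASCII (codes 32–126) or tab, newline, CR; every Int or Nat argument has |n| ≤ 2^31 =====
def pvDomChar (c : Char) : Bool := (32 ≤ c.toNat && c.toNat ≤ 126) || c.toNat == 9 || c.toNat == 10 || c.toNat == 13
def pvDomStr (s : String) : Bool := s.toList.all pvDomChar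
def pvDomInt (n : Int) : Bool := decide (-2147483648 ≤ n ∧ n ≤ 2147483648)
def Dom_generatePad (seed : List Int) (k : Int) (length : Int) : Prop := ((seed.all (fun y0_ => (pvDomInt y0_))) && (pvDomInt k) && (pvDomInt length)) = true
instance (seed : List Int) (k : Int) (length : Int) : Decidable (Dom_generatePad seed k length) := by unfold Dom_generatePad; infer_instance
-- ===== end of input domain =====

-- B replaces A's pop(0)/append sliding register with one flat self-referential list s
-- (s[n+i] = s[i] ^ s[i+(-k)%n]) built by plain appends, removing the per-step pop(0) shifting
-- (objective: faster; a timing run measured B faster at the largest sizes).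
-- Both Pythons mutate `seed` in place identically; the equivalence proved here is about the RETURN value.

-- ===== PORT A =====
def padLoopA (k : Int) (fuel : Nat) (seed prl : List Int) : List Int :=
  match fuel with
  | 0 => prl
  | f + 1 =>
    let xor := PySem.Int.bxor (PySem.List.pyGetD seed 0 0) (PySem.List.pyGetD seed (-k) 0)
    let seed' := seed.drop 1 ++ [xor]
    padLoopA k f seed' (prl ++ [PySem.List.pyGetD seed' (-1) 0])

def generatePad (seed : List Int) (k : Int) (length : Int) : List Int :=
  padLoopA k length.toNat seed []

-- ===== PORT B =====
def generatePad_alt (seed : List Int) (k : Int) (length : Int) : List Int :=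
  if length ≤ 0 then []
  else
    let n : Int := seed.length
    let j : Int := PySem.Int.mod (-k) n
    let s := (PySem.List.pyRange 0 length 1).foldl
      (fun s i => s ++ [PySem.Int.bxor (PySem.List.pyGetD s i 0) (PySem.List.pyGetD s (i + j) 0)])
      seed
    PySem.List.slice s (some n) none

-- ===== PRECONDITION & SPEC =====
-- Pre_ excludes exactly the inputs where A raises IndexError on seed[0]/seed[-k]
-- (length ≥ 1 with empty seed, or k outside (-len(seed), len(seed)]).
def Pre_generatePad (seed : List Int) (k : Int) (length : Int) : Prop :=
  length ≤ 0 ∨ (0 < seed.length ∧ -(seed.length : Int) < k ∧ k ≤ (seed.length : Int))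
instance (seed : List Int) (k : Int) (length : Int) : Decidable (Pre_generatePad seed k length) := by unfold Pre_generatePad; infer_instance
def pvWitness_generatePad : List Int × Int × Int := ([3, 5, 7], 2, 4)

def Spec_generatePad (seed : List Int) (k : Int) (length : Int) (out : List Int) : Prop := out = generatePad_alt seed k length
instance (seed : List Int) (k : Int) (length : Int) (out : List Int) : Decidable (Spec_generatePad seed k length out) := by unfold Spec_generatePad; infer_instance

-- ===== CLAIM (what is proved, stated in full; the proofs are below) =====
def Claim_equal_generatePad : Prop := ∀ (seed : List Int) (k : Int) (length : Int), Dom_generatePad seed k length → Pre_generatePad seed k length → Spec_generatePad seed k length (generatePad seed k length)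

-- ===== LEMMAS AND PROOFS =====

-- B-side loop as a recursion (the foldl over pyRange unrolled one step per index)
def bIter (j : Int) (fuel : Nat) (i : Int) (s : List Int) : List Int :=
  match fuel with
  | 0 => s
  | f + 1 =>
    bIter j f (i + 1)
      (s ++ [PySem.Int.bxor (PySem.List.pyGetD s i 0) (PySem.List.pyGetD s (i + j) 0)])

lemma foldl_eq_bIter (j : Int) : ∀ (f : Nat) (a : Int) (s : List Int),
    (PySem.List.pyRange a (a + f) 1).foldl
      (fun s i => s ++ [PySem.Int.bxor (PySem.List.pyGetD s i 0) (PySem.List.pyGetD s (i + j) 0)]) s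
    = bIter j f a s := by
  intro f
  induction f with
  | zero => intro a s; simp [PySem.List.pyRange_one_eq_nil, bIter]
  | succ f ih =>
    intro a s
    rw [PySem.List.pyRange_one_cons (by omega)]
    simp only [List.foldl_cons]
    have : a + (f + 1 : Nat) = (a + 1) + (f : Nat) := by push_cast; ring
    rw [this, ih]
    rfl

lemma xor_index (s : List Int) (t n : Nat) (k : Int)
    (hlen : s.length = n + t) (hn : 0 < n)
    (hk1 : -(n : Int) < k) (hk2 : k ≤ (n : Int)) :
    PySem.List.pyGetD (s.drop t) (-k) 0
      = PySem.List.pyGetD s ((t : Int) + PySem.Int.mod (-k) (n : Int)) 0 := by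
  have hmod : PySem.Int.mod (-k) (n : Int) = (-k) % (n : Int) :=
    PySem.Int.mod_eq_emod_of_pos (by omega)
  rw [hmod]
  have hdl : (s.drop t).length = n := by simp [hlen]
  by_cases hk : k ≤ 0
  · have h1 : (-k) % (n : Int) = -k := Int.emod_eq_of_lt (by omega) (by omega)
    rw [h1]
    rw [PySem.List.pyGetD_eq_getElem _ _ (by omega) (by rw [hdl]; omega),
        PySem.List.pyGetD_eq_getElem _ _ (by omega) (by rw [hlen]; push_cast; omega),
        List.getElem_drop]
    congr 1
    omega
  · have h1 : (-k) % (n : Int) = (n : Int) - k := by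
      have h2 : (-k + (n:Int) * 1) % (n:Int) = (-k) % n := Int.add_mul_emod_self_left (-k) n 1
      rw [← h2]
      exact Int.emod_eq_of_lt (by omega) (by omega) |>.trans (by ring)
    rw [h1]
    have hkeq : -k = -((k.toNat : Nat) : Int) := by omega
    rw [hkeq, PySem.List.pyGetD_neg_natCast _ _ _ (by omega) (by rw [hdl]; omega),
        PySem.List.pyGetD_eq_getElem _ _ (by omega) (by rw [hlen]; push_cast; omega),
        List.getElem_drop]
    congr 1
    rw [hdl]
    omega

lemma main_loop (k : Int) (n : Nat) (hn : 0 < n)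
    (hk1 : -(n : Int) < k) (hk2 : k ≤ (n : Int)) :
    ∀ (f t : Nat) (s : List Int), s.length = n + t →
    padLoopA k f (s.drop t) (s.drop n)
      = (bIter (PySem.Int.mod (-k) (n : Int)) f (t : Int) s).drop n := by
  intro f
  induction f with
  | zero => intro t s hlen; simp [padLoopA, bIter]
  | succ f ih =>
    intro t s hlen
    set j := PySem.Int.mod (-k) (n : Int) with hj
    have hfirst : PySem.List.pyGetD (s.drop t) 0 (0:Int) = PySem.List.pyGetD s (t : Int) 0 := by
      rw [PySem.List.pyGetD_zero, PySem.List.pyGetD_natCast,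
          List.getD_eq_getElem _ _ (by simp [hlen]; omega),
          List.getD_eq_getElem _ _ (by omega : t < s.length), List.getElem_drop]
      simp
    have hsecond := xor_index s t n k hlen hn hk1 hk2
    set e := PySem.Int.bxor (PySem.List.pyGetD s (t:Int) 0) (PySem.List.pyGetD s ((t:Int) + j) 0) with he
    show padLoopA k (f+1) (s.drop t) (s.drop n) = (bIter j (f+1) (t:Int) s).drop n
    rw [padLoopA, bIter]
    simp only [hfirst, hsecond, ← hj, ← he]
    have hdd : (s.drop t).drop 1 ++ [e] = (s ++ [e]).drop (t+1) := by
      rw [List.drop_drop, List.drop_append_of_le_length (by omega)]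
    rw [PySem.List.pyGetD_neg_one_append_singleton, hdd]
    have hpr : s.drop n ++ [e] = (s ++ [e]).drop n := by
      rw [List.drop_append_of_le_length (by omega)]
    rw [hpr]
    have := ih (t+1) (s ++ [e]) (by simp [hlen]; omega)
    push_cast at this ⊢
    exact this

theorem generatePad_spec : Claim_equal_generatePad := by
  intro seed k length _ hp
  by_cases hl : length ≤ 0
  · have h0 : length.toNat = 0 := by omega
    simp only [Spec_generatePad, generatePad, generatePad_alt, if_pos hl, h0]
    rfl
  · have hpre : 0 < seed.length ∧ -(seed.length : Int) < k ∧ k ≤ (seed.length : Int) := by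
      rcases hp with h | h
      · omega
      · exact h
    simp only [Spec_generatePad, generatePad, generatePad_alt, if_neg hl]
    have hcast : length = 0 + ((length.toNat : Nat) : Int) := by omega
    rw [hcast, foldl_eq_bIter, PySem.List.slice_from_natCast]
    have htn : ((0 + ((length.toNat : Nat) : Int)).toNat) = length.toNat := by omega
    rw [htn]
    have := main_loop k seed.length hpre.1 hpre.2.1 hpre.2.2 length.toNat 0 seed (by omega)
    simp only [List.drop_zero, Nat.cast_zero] at this
    rw [List.drop_length] at this
    exact this
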